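-- pv_equiv track=rewrite | github.com/arminu07/icare | Icare/app/email_alerts.py | _determine_risk_title
-- ===== SOURCE A (Python) =====
-- def _determine_risk_title(risk_diseases):
--     has_high = any(d.get('risk') == 'High' for d in risk_diseases)
--     has_medium = any(d.get('risk') == 'Medium' for d in risk_diseases)
--
--     if has_high and has_medium:
--         return 'HIGH & MEDIUM'
--     elif has_high:
--         return 'HIGH'
--     elif has_medium:
--         return 'MEDIUM'
--     return 'LOW'
-- ===== SOURCE B (Python) =====
-- def _determine_risk_title(risk_diseases):
--     titles = ('LOW', 'HIGH', 'MEDIUM', 'HIGH & MEDIUM')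
--     mask = 0
--     for d in risk_diseases:
--         r = d.get('risk')
--         if r == 'High':
--             mask |= 1
--         elif r == 'Medium':
--             mask |= 2
--         if mask == 3:
--             break
--     return titles[mask]
-- ===== Notes on version B (the rewrite author's own statement) =====
-- stated objective: alternative
-- what changed: Replaces A's two any() scans and if/elif branch chain with a single short-circuiting loop that accumulates a 2-bit presence mask (1=High, 2=Medium), breaking early once both are seen, and returns the title from a 4-entry lookup table indexed by the mask.
import Mathlib
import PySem

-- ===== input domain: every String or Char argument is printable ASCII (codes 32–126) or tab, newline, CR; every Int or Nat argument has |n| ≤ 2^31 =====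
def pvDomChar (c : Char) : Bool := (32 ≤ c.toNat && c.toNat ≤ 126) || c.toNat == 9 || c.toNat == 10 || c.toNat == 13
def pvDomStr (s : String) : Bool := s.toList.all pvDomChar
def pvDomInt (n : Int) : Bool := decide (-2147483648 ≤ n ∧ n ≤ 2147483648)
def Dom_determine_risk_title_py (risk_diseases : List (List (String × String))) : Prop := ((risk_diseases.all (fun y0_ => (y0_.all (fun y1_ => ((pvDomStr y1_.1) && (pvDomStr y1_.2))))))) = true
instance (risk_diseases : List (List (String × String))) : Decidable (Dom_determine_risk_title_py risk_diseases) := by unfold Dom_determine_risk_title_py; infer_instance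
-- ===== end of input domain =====

-- B replaces A's two any() scans + if/elif chain by one short-circuiting loop accumulating a
-- 2-bit presence mask and a 4-entry title table; objective: alternative (same O(n) cost).


-- ===== PORT A =====
-- two any() scans, then the if/elif chain
def determine_risk_title_py (risk_diseases : List (List (String × String))) : String :=
  let has_high := risk_diseases.any (fun d => (PySem.Dict.mk d).get? "risk" == some "High")
  let has_medium := risk_diseases.any (fun d => (PySem.Dict.mk d).get? "risk" == some "Medium")
  if has_high && has_medium then "HIGH & MEDIUM"
  else if has_high then "HIGH"
  else if has_medium then "MEDIUM"
  else "LOW"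

-- ===== PORT B =====
-- the for-loop with early break (the 'if mask == 3: break' exit), as structural recursion
def pvMaskLoop (l : List (List (String × String))) (mask : Nat) : Nat :=
  match l with
  | [] => mask
  | d :: rest =>
    let r := (PySem.Dict.mk d).get? "risk"
    let mask' := if r == some "High" then mask ||| 1
                 else if r == some "Medium" then mask ||| 2
                 else mask
    if mask' == 3 then mask' else pvMaskLoop rest mask'

-- single pass accumulating the 2-bit mask, then the table lookup titles[mask]
-- (mask is always ≤ 3, so the getD default is never used; exact for Python's tuple indexing)
def determine_risk_title_py_alt (risk_diseases : List (List (String × String))) : String :=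
  let titles := ["LOW", "HIGH", "MEDIUM", "HIGH & MEDIUM"]
  let mask := pvMaskLoop risk_diseases 0
  titles.getD mask ""

-- ===== PRECONDITION & SPEC =====
def Spec_determine_risk_title_py (risk_diseases : List (List (String × String))) (out : String) : Prop := out = determine_risk_title_py_alt risk_diseases
instance (risk_diseases : List (List (String × String))) (out : String) : Decidable (Spec_determine_risk_title_py risk_diseases out) := by unfold Spec_determine_risk_title_py; infer_instance

-- ===== CLAIM (what is proved, stated in full; the proofs are below) =====
def Claim_equal_determine_risk_title_py : Prop := ∀ (risk_diseases : List (List (String × String))), Dom_determine_risk_title_py risk_diseases → Spec_determine_risk_title_py risk_diseases (determine_risk_title_py risk_diseases)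

-- ===== LEMMAS AND PROOFS =====
-- characterisation of the loop: for a mask ≤ 3, the result is the mask OR-ed with the
-- presence bits of 'High' (1) and 'Medium' (2) over the whole list (the early break is sound
-- because 3 ||| b = 3 for the bits that could still arrive)
theorem pvMaskLoop_eq (l : List (List (String × String))) (m : Nat) (hm : m ≤ 3) :
    pvMaskLoop l m
      = m ||| (if l.any (fun d => (PySem.Dict.mk d).get? "risk" == some "High") then 1 else 0)
          ||| (if l.any (fun d => (PySem.Dict.mk d).get? "risk" == some "Medium") then 2 else 0) := by
  induction l generalizing m with
  | nil => simp [pvMaskLoop]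
  | cons d rest ih =>
    simp only [pvMaskLoop, List.any_cons]
    -- abbreviations for the four boolean facts the goal depends on
    have key : ∀ m' : Nat, m' ≤ 3 →
        (if m' == 3 then m' else pvMaskLoop rest m')
          = m' ||| (if rest.any (fun d => (PySem.Dict.mk d).get? "risk" == some "High") then 1 else 0)
              ||| (if rest.any (fun d => (PySem.Dict.mk d).get? "risk" == some "Medium") then 2 else 0) := by
      intro m' hm'
      by_cases h3 : (m' == 3) = true
      · have : m' = 3 := by simpa using h3
        subst this
        simp only [h3, if_true]
        by_cases hR : (rest.any (fun d => (PySem.Dict.mk d).get? "risk" == some "High")) = true <;>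
          by_cases hM : (rest.any (fun d => (PySem.Dict.mk d).get? "risk" == some "Medium")) = true <;>
            simp [hR, hM]
      · simp only [h3, if_false]
        exact ih m' hm'
    by_cases hH : ((PySem.Dict.mk d).get? "risk" == some "High") = true <;>
      by_cases hMd : ((PySem.Dict.mk d).get? "risk" == some "Medium") = true
    · -- impossible: d.get('risk') equals both 'High' and 'Medium'
      exfalso
      have h1 := eq_of_beq hH
      have h2 := eq_of_beq hMd
      rw [h1] at h2
      simp at h2
    · simp only [hH, hMd, if_true, if_false, Bool.false_eq_true, eq_self_iff_true, Bool.true_or]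
      rw [key (m ||| 1) (by interval_cases m <;> decide)]
      by_cases hR : (rest.any (fun d => (PySem.Dict.mk d).get? "risk" == some "High")) = true <;>
        by_cases hM : (rest.any (fun d => (PySem.Dict.mk d).get? "risk" == some "Medium")) = true <;>
          · simp only [hR, hM]
            interval_cases m <;> simp_all
    · simp only [hH, hMd, if_true, if_false, Bool.false_eq_true, eq_self_iff_true, Bool.false_or, Bool.true_or]
      rw [key (m ||| 2) (by interval_cases m <;> decide)]
      by_cases hR : (rest.any (fun d => (PySem.Dict.mk d).get? "risk" == some "High")) = true <;>
        by_cases hM : (rest.any (fun d => (PySem.Dict.mk d).get? "risk" == some "Medium")) = true <;>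
          · simp only [hR, hM]
            interval_cases m <;> simp_all
    · simp only [hH, hMd, if_true, if_false, Bool.false_eq_true, eq_self_iff_true, Bool.false_or]
      rw [key m hm]

-- ===== VERDICT (by name: the statement is the Claim_ definition above) =====
theorem determine_risk_title_py_spec : Claim_equal_determine_risk_title_py := by
  intro rd _
  unfold Spec_determine_risk_title_py determine_risk_title_py determine_risk_title_py_alt
  rw [pvMaskLoop_eq rd 0 (by omega)]
  by_cases hH : (rd.any (fun d => (PySem.Dict.mk d).get? "risk" == some "High")) = true <;>
    by_cases hM : (rd.any (fun d => (PySem.Dict.mk d).get? "risk" == some "Medium")) = true <;>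
      simp [hH, hM]
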